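-- pv_equiv track=rewrite | github.com/KarolinaGador/prg3 | mocksrock3/p1.py | f
-- ===== SOURCE A (Python) =====
-- def f(word):
--     lista = []
--     if len(word)<=1:
--         return word.upper()
--
--     elif len(word)>1:
--        cos =""
--        for i in range(len(word)):
--
--         for idx, litera in enumerate(word.lower()):
--            if idx==i:
--               cos = cos + litera.upper()
--            else:
--               cos = cos + litera
--         if i != len(word)-1:
--          cos = cos + "-"
--        return cos
-- ===== SOURCE B (Python) =====
-- def f(word):
--     lw = word.lower()
--     return "-".join(lw[:i] + c.upper() + lw[i + 1:] for i, c in enumerate(lw))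
-- ===== Notes on version B (the rewrite author's own statement) =====
-- stated objective: simpler
-- what changed: Replaces the nested enumerate loop with per-character string concatenation, manual dash appending and the len<=1 special case by a single dash-join over slice-built variants (lowered prefix + uppercased char + lowered suffix), lowering the word once.
import Mathlib
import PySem

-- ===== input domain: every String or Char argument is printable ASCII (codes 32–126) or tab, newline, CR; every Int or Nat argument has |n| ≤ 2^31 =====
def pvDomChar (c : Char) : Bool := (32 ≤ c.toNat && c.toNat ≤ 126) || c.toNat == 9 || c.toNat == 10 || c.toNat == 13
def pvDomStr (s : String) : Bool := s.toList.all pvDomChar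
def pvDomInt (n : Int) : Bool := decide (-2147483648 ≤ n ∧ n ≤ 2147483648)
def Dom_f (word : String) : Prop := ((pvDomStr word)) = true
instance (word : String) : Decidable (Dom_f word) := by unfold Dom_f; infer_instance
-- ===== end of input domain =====

-- B replaces A's nested per-character loop and len<=1 guard by one dash-join over slice-built variants (simpler decomposition; a timing run measured it faster by a constant factor).

-- ===== PORT A =====
def f (word : String) : String :=
  if PySem.Str.len word ≤ 1 then PySem.Str.upper word
  else
    String.ofList ((PySem.List.pyRange 0 (PySem.Str.len word) 1).foldl (fun cos i =>
      let cos2 := (PySem.List.enumerate (PySem.Chars.lower word.toList) 0).foldl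
        (fun cos p => if p.1 == i then cos ++ [PySem.Chars.upperChar p.2] else cos ++ [p.2]) cos
      if i ≠ PySem.Str.len word - 1 then cos2 ++ ['-'] else cos2) [])

-- ===== PORT B =====
def f_alt (word : String) : String :=
  let lw := PySem.Chars.lower word.toList
  String.ofList (PySem.Chars.join ['-'] ((PySem.List.enumerate lw 0).map (fun p =>
    PySem.List.slice lw none (some p.1) ++ [PySem.Chars.upperChar p.2] ++
      PySem.List.slice lw (some (p.1 + 1)) none)))

-- ===== PRECONDITION & SPEC =====
def Spec_f (word : String) (out : String) : Prop := out = f_alt word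
instance (word : String) (out : String) : Decidable (Spec_f word out) := by unfold Spec_f; infer_instance

-- ===== CLAIM (what is proved, stated in full; the proofs are below) =====
def Claim_equal_f : Prop := ∀ (word : String), Dom_f word → Spec_f word (f word)

-- ===== LEMMAS AND PROOFS =====

theorem charle (a b : Char) : a ≤ b ↔ a.toNat ≤ b.toNat := by
  rw [Char.le_def, UInt32.le_iff_toNat_le]; exact Iff.rfl

theorem upper_lower (c : Char) :
    PySem.Chars.upperChar (PySem.Chars.lowerChar c) = PySem.Chars.upperChar c := by
  unfold PySem.Chars.lowerChar
  by_cases h : PySem.Chars.isupper c = true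
  · simp only [h, if_true]
    have hn : ('A' ≤ c ∧ c ≤ 'Z') := by simpa [PySem.Chars.isupper] using h
    have e1 : 'a'.toNat = 97 := rfl
    have e3 : 'A'.toNat = 65 := rfl
    have e4 : 'Z'.toNat = 90 := rfl
    have e2 : 'z'.toNat = 122 := rfl
    have h1 : 65 ≤ c.toNat ∧ c.toNat ≤ 90 := by
      have := (charle _ _).mp hn.1; have := (charle _ _).mp hn.2; omega
    have hv : (c.toNat + 32).isValidChar := by left; omega
    have ht : (Char.ofNat (c.toNat + 32)).toNat = c.toNat + 32 := by
      rw [Char.toNat_ofNat, if_pos hv]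
    unfold PySem.Chars.upperChar PySem.Chars.islower
    have hl1 : 'a' ≤ Char.ofNat (c.toNat + 32) := (charle _ _).mpr (by rw [ht]; omega)
    have hl2 : Char.ofNat (c.toNat + 32) ≤ 'z' := (charle _ _).mpr (by rw [ht]; omega)
    have hnl : ¬ ('a' ≤ c) := fun ha => by have := (charle _ _).mp ha; omega
    simp only [hl1, hl2, decide_true, Bool.and_self, if_true, ht]
    rw [if_neg (by simp [hnl])]
    have h2 : c.toNat + 32 - 32 = c.toNat := by omega
    rw [h2, Char.ofNat_toNat]
  · simp [h]

-- the emphasized variant, as B builds it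
def emph (lw : List Char) (k : Nat) : List Char :=
  lw.take k ++ [PySem.Chars.upperChar lw[k]!] ++ lw.drop (k + 1)

theorem noHit (lw : List Char) (s i : ℤ) (h : i < s) :
    (PySem.List.enumerate lw s).flatMap
      (fun p => if p.1 == i then [PySem.Chars.upperChar p.2] else [p.2]) = lw := by
  induction lw generalizing s with
  | nil => simp [PySem.List.enumerate_nil]
  | cons c rest ih =>
    rw [PySem.List.enumerate_cons]
    simp only [List.flatMap_cons]
    rw [if_neg (by simp; omega), ih (s + 1) (by omega)]
    rfl

theorem vA_eq (lw : List Char) (k : Nat) (s : ℤ) (hk : k < lw.length) :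
    (PySem.List.enumerate lw s).flatMap
      (fun p => if p.1 == s + (k : ℤ) then [PySem.Chars.upperChar p.2] else [p.2])
      = emph lw k := by
  induction lw generalizing s k with
  | nil => simp at hk
  | cons c rest ih =>
    rw [PySem.List.enumerate_cons]
    simp only [List.flatMap_cons]
    cases k with
    | zero =>
      rw [if_pos (by simp), noHit rest (s + 1) (s + ((0:Nat):ℤ)) (by push_cast; omega)]
      simp [emph]
    | succ m =>
      rw [if_neg (by simp; omega)]
      have := ih m (s + 1) (by simpa using Nat.lt_of_succ_lt_succ hk)
      rw [show s + 1 + (m : ℤ) = s + ((m : ℤ) + 1) by ring] at this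
      rw [show ((m + 1 : Nat) : ℤ) = (m : ℤ) + 1 by push_cast; ring]
      rw [this]
      simp [emph]

theorem join_last (ls : List (List Char)) (last : List Char) :
    PySem.Chars.join ['-'] (ls ++ [last]) = ls.flatMap (fun x => x ++ ['-']) ++ last := by
  induction ls with
  | nil => simp [PySem.Chars.join_singleton]
  | cons a ls ih =>
    rcases hq : ls ++ [last] with _ | ⟨b, rest⟩
    · simp at hq
    · rw [List.cons_append, hq, PySem.Chars.join_cons_cons, ← hq, ih]
      simp

theorem foldl_append_of_pointwise {α : Type} (F : List Char → α → List Char)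
    (g : α → List Char) (h : ∀ cos i, F cos i = cos ++ g i) :
    ∀ (l : List α) (a : List Char), l.foldl F a = a ++ l.flatMap g := by
  intro l
  induction l with
  | nil => intro a; simp
  | cons x xs ih => intro a; simp [List.foldl_cons, h, ih]

theorem flatMap_congr_mem {α β : Type} (l : List α) (g1 g2 : α → List β)
    (h : ∀ x ∈ l, g1 x = g2 x) : l.flatMap g1 = l.flatMap g2 := by
  simp only [List.flatMap_def]
  rw [List.map_congr_left h]

theorem vA_eq0 (lw : List Char) (k : Nat) (hk : k < lw.length) :
    (PySem.List.enumerate lw 0).flatMap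
      (fun p => if p.1 == (k : ℤ) then [PySem.Chars.upperChar p.2] else [p.2])
      = emph lw k := by
  have := vA_eq lw k 0 hk
  simpa using this

theorem main_eq (word : String) : f word = f_alt word := by
  have hlw : (PySem.Chars.lower word.toList).length = word.toList.length := by
    simp [PySem.Chars.lower]
  by_cases hsmall : word.toList.length ≤ 1
  · -- A's len<=1 branch: upper(word); B's join has 0 or 1 piece
    unfold f f_alt
    rw [if_pos (by rw [PySem.Str.len_eq]; exact_mod_cast hsmall)]
    apply String.toList_inj.mp
    rcases hcase : word.toList with _ | ⟨c, rest⟩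
    · simp [PySem.Str.toList_upper, PySem.Chars.upper, hcase, PySem.Chars.lower,
        PySem.List.enumerate_nil, PySem.Chars.join_nil]
    · have hrest : rest = [] := by
        rw [hcase] at hsmall; simp at hsmall; exact hsmall
      subst hrest
      simp only [hcase, PySem.Str.toList_upper, PySem.Chars.upper, PySem.Chars.lower,
        List.map_cons, List.map_nil, PySem.List.enumerate_cons, PySem.List.enumerate_nil,
        PySem.Chars.join_singleton, String.toList_ofList]
      simp [PySem.List.slice, upper_lower c]
  · -- main branch
    unfold f f_alt
    rw [if_neg (by rw [PySem.Str.len_eq]; intro h; exact hsmall (by exact_mod_cast h))]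
    apply String.toList_inj.mp
    simp only [String.toList_ofList]
    set lw := PySem.Chars.lower word.toList with hlwdef
    set n := word.toList.length with hndef
    have hlwn : lw.length = n := hlw
    obtain ⟨m, hm⟩ : ∃ m, n = m + 1 := ⟨n - 1, by omega⟩
    -- A side: the fold appends, per i, the emphasized variant plus a dash (except last)
    have hA : ((PySem.List.pyRange 0 (PySem.Str.len word) 1).foldl (fun cos i =>
        let cos2 := (PySem.List.enumerate lw 0).foldl
          (fun cos p => if p.1 == i then cos ++ [PySem.Chars.upperChar p.2] else cos ++ [p.2]) cos
        if i ≠ PySem.Str.len word - 1 then cos2 ++ ['-'] else cos2) [])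
        = (List.range m).flatMap (fun k => emph lw k ++ ['-']) ++ emph lw m := by
      rw [foldl_append_of_pointwise _
        (fun i => (PySem.List.enumerate lw 0).flatMap
            (fun p => if p.1 == i then [PySem.Chars.upperChar p.2] else [p.2]) ++
          if i ≠ PySem.Str.len word - 1 then ['-'] else [])
        (by
          intro cos i
          have hfun : (fun (cos : List Char) (p : ℤ × Char) =>
              if p.1 == i then cos ++ [PySem.Chars.upperChar p.2] else cos ++ [p.2])
              = fun cos p => cos ++ (if p.1 == i then [PySem.Chars.upperChar p.2] else [p.2]) := by
            funext cos p; split <;> rfl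
          have hin : (PySem.List.enumerate lw 0).foldl
              (fun cos p => if p.1 == i then cos ++ [PySem.Chars.upperChar p.2] else cos ++ [p.2]) cos
              = cos ++ (PySem.List.enumerate lw 0).flatMap
                  (fun p => if p.1 == i then [PySem.Chars.upperChar p.2] else [p.2]) := by
            rw [hfun]; exact PySem.List.foldl_append_eq_flatMap _ _ _
          dsimp only
          rw [hin]
          split <;> simp)]
      rw [PySem.Str.len_eq]
      have hrange : PySem.List.pyRange 0 ((word.toList.length : ℤ)) 1
          = (List.range n).map (fun k : ℕ => (k : ℤ)) := by
        rw [PySem.List.pyRange_one]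
        simp only [sub_zero, Int.toNat_natCast, zero_add, ← hndef]
      rw [hrange, List.flatMap_map, hm, List.range_succ, List.flatMap_append]
      rw [flatMap_congr_mem (List.range m) _ (fun k => emph lw k ++ ['-']) (by
        intro k hkmem
        have hkm : k < m := List.mem_range.mp hkmem
        dsimp only
        rw [if_pos (by rw [← hndef, hm]; push_cast; omega), vA_eq0 lw k (by omega)])]
      simp only [List.flatMap_cons, List.flatMap_nil, List.append_nil, List.nil_append]
      rw [if_neg (by rw [← hndef, hm]; push_cast; omega), vA_eq0 lw m (by omega)]
      simp
    rw [hA]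
    -- B side
    have hmapB : (PySem.List.enumerate lw 0).map (fun p =>
        PySem.List.slice lw none (some p.1) ++ [PySem.Chars.upperChar p.2] ++
          PySem.List.slice lw (some (p.1 + 1)) none)
        = (List.range n).map (emph lw) := by
      apply List.ext_getElem
      · simp [PySem.List.length_enumerate, hlwn]
      · intro k h1 h2
        have hk : k < lw.length := by
          simpa [PySem.List.length_enumerate] using h1
        rw [List.getElem_map, List.getElem_map, PySem.List.getElem_enumerate]
        simp only [zero_add, List.getElem_range]
        rw [PySem.List.slice_to_natCast]
        rw [show ((k : ℤ) + 1) = ((k + 1 : Nat) : ℤ) by push_cast; ring]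
        rw [PySem.List.slice_from_natCast]
        simp [emph, getElem!_pos, hk]
    rw [hmapB, hm, List.range_succ, List.map_append, List.map_singleton, join_last,
      List.flatMap_map]

-- ===== VERDICT (by name: the statement is the Claim_ definition above) =====
theorem f_spec : Claim_equal_f := by
  intro word _
  unfold Spec_f
  exact main_eq word
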